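-- pv_equiv track=rewrite | github.com/jeanollion/distnet | distnet/utils/pre_processing.py | _get_contours_2d
-- ===== SOURCE A (Python) =====
-- def _get_contours_2d(element):
--     v = element[4]
--     if v==0:
--         return False
--     else:
--         for vv in element:
--             if vv!=v:
--                 return True
--         return False
-- ===== SOURCE B (Python) =====
-- def _get_contours_2d(element):
--     if element[4] == 0:
--         return False
--     return min(element) != max(element)
-- ===== Notes on version B (the rewrite author's own statement) =====
-- stated objective: alternative
-- what changed: Replaces A's first-mismatch scan against element[4] by two extrema reductions: the list has a differing value iff min(element) != max(element), so no comparison against the center value is needed for the scan.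
import Mathlib
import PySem

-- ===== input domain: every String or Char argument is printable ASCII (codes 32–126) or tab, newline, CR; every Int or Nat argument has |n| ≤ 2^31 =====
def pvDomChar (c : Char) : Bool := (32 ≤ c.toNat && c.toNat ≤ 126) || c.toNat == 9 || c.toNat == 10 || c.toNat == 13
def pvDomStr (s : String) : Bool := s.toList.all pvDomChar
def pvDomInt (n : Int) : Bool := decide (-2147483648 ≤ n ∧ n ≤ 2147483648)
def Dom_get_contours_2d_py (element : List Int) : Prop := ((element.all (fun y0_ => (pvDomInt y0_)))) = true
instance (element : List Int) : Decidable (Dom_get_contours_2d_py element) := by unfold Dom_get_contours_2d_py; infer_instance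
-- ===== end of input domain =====

-- B decides "some element differs" by comparing the list's min and max instead of scanning for a mismatch with element[4].

-- ===== PORT A =====
-- the 'for vv in element: if vv != v: return True / return False' loop of A
def pvALoop (v : Int) : List Int → Bool
  | [] => false
  | vv :: rest => if vv ≠ v then true else pvALoop v rest

def get_contours_2d_py (element : List Int) : Bool :=
  match PySem.List.pyGet? element 4 with
  | none => false          -- IndexError in Python; excluded by Pre_
  | some v => if v = 0 then false else pvALoop v element

-- ===== PORT B =====
def get_contours_2d_py_alt (element : List Int) : Bool :=
  match PySem.List.pyGet? element 4 with
  | none => false          -- IndexError in Python; excluded by Pre_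
  | some v =>
    if v = 0 then false
    else
      match PySem.List.min? element (fun x => x), PySem.List.max? element (fun x => x) with
      | some m, some M => decide (m ≠ M)
      | _, _ => false      -- unreachable: element is nonempty when element[4] exists

-- ===== PRECONDITION & SPEC =====
-- Pre_ excludes exactly the lists of length < 5, on which element[4] raises IndexError in both programs.
def Pre_get_contours_2d_py (element : List Int) : Prop := 5 ≤ element.length
instance (element : List Int) : Decidable (Pre_get_contours_2d_py element) := by unfold Pre_get_contours_2d_py; infer_instance
def pvWitness_get_contours_2d_py : List Int := [1, 2, 3, 4, 5]

def Spec_get_contours_2d_py (element : List Int) (out : Bool) : Prop := out = get_contours_2d_py_alt element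
instance (element : List Int) (out : Bool) : Decidable (Spec_get_contours_2d_py element out) := by unfold Spec_get_contours_2d_py; infer_instance

-- ===== CLAIM (what is proved, stated in full; the proofs are below) =====
def Claim_equal_get_contours_2d_py : Prop := ∀ (element : List Int), Dom_get_contours_2d_py element → Pre_get_contours_2d_py element → Spec_get_contours_2d_py element (get_contours_2d_py element)

-- ===== LEMMAS AND PROOFS =====

theorem pvALoop_eq_true_iff (v : Int) (l : List Int) :
    pvALoop v l = true ↔ ∃ x ∈ l, x ≠ v := by
  induction l with
  | nil => simp [pvALoop]
  | cons a t ih =>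
    by_cases h : a = v
    · simp [pvALoop, h, ih]
    · simp [pvALoop, h]

-- min = max iff all elements are equal (for a list containing v)
theorem pv_minmax_eq_iff (v m M : Int) (l : List Int) (hv : v ∈ l)
    (hm : PySem.List.min? l (fun x => x) = some m)
    (hM : PySem.List.max? l (fun x => x) = some M) :
    (m = M) ↔ ∀ x ∈ l, x = v := by
  have hmle : ∀ y ∈ l, m ≤ y := PySem.List.min?_isMin hm
  have hMle : ∀ y ∈ l, y ≤ M := PySem.List.max?_isMax hM
  have hmmem : m ∈ l := PySem.List.min?_mem hm
  have hMmem : M ∈ l := PySem.List.max?_mem hM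
  constructor
  · intro h x hx
    have h1 := hmle x hx
    have h2 := hMle x hx
    have h3 := hmle v hv
    have h4 := hMle v hv
    omega
  · intro hall
    have h1 := hall m hmmem
    have h2 := hall M hMmem
    omega

-- ===== VERDICT (by name: the statement is the Claim_ definition above) =====
theorem get_contours_2d_py_spec : Claim_equal_get_contours_2d_py := by
  intro element _ hpre
  unfold Spec_get_contours_2d_py get_contours_2d_py get_contours_2d_py_alt
  have hlt : (4 : ℕ) < element.length := by
    unfold Pre_get_contours_2d_py at hpre; omega
  have hget : PySem.List.pyGet? element (4 : Int) = some element[4] := by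
    have h4 : (4 : Int) = ((4 : Nat) : Int) := rfl
    rw [h4, PySem.List.pyGet?_natCast]
    exact List.getElem?_eq_getElem hlt
  rw [hget]
  have hne : element ≠ [] := by
    intro h; rw [h] at hlt; simp at hlt
  obtain ⟨m, hm⟩ : ∃ m, PySem.List.min? element (fun x => x) = some m := by
    cases hc : PySem.List.min? element (fun x => x) with
    | none => exact absurd (((PySem.List.min?_eq_none_iff _ _).mp hc)) hne
    | some m => exact ⟨m, rfl⟩
  obtain ⟨M, hM⟩ : ∃ M, PySem.List.max? element (fun x => x) = some M := by
    cases hc : PySem.List.max? element (fun x => x) with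
    | none => exact absurd (((PySem.List.max?_eq_none_iff _ _).mp hc)) hne
    | some M => exact ⟨M, rfl⟩
  rw [hm, hM]
  by_cases h0 : element[4] = 0
  · simp [h0]
  · simp only [h0, if_false]
    have hv : element[4] ∈ element := List.getElem_mem hlt
    by_cases hall : ∀ x ∈ element, x = element[4]
    · have hmM : m = M := (pv_minmax_eq_iff element[4] m M element hv hm hM).2 hall
      have hfa : pvALoop element[4] element = false := by
        rw [Bool.eq_false_iff]
        intro hc
        obtain ⟨x, hx, hxne⟩ := (pvALoop_eq_true_iff element[4] element).1 hc
        exact hxne (hall x hx)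
      simp [hfa, hmM]
    · push Not at hall
      obtain ⟨x, hx, hxne⟩ := hall
      have hta : pvALoop element[4] element = true :=
        (pvALoop_eq_true_iff element[4] element).2 ⟨x, hx, hxne⟩
      have hmM : m ≠ M := fun hc =>
        hxne ((pv_minmax_eq_iff element[4] m M element hv hm hM).1 hc x hx)
      simp [hta, hmM]
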